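-- pv_equiv track=rewrite | github.com/rlsu9/manim | sta_attention.py | get_tile_window_indices
-- ===== SOURCE A (Python) =====
-- def get_tile_center(pos, canvas_size=6, kernel_size=3):
--     """Calculate the window center for a given position with edge clamping"""
--     kernel_half = kernel_size // 2
--     row = pos // canvas_size
--     col = pos % canvas_size
--
--     # Clamp the center coordinates
--     center_row = min(max(row, kernel_half), canvas_size - kernel_half - 1)
--     center_col = min(max(col, kernel_half), canvas_size - kernel_half - 1)
--
--     return center_row, center_col
--
-- def get_tile_window_indices(query_tile, canvas_size=12, window_size=3):
--     """Get indices of tiles within the window for a given query tile"""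
--     tiles_per_row = canvas_size // 2
--
--     # Get the center tile for attention
--     center_row, center_col = get_tile_center(query_tile, tiles_per_row)
--
--     half_window = window_size // 2
--
--     # Calculate tile range with clamping
--     start_row = center_row - half_window
--     end_row = center_row + half_window + 1
--     start_col = center_col - half_window
--     end_col = center_col + half_window + 1
--
--     tile_indices = []
--     for row in range(start_row, end_row):
--         for col in range(start_col, end_col):
--             tile_idx = row * tiles_per_row + col
--             # Convert tile index to all positions within the tile
--             for i in range(4):  # 4 positions per tile
--                 pos = tile_idx * 4 + i
--                 tile_indices.append(pos)
--     assert len(tile_indices) == 36, f"Expected 9 positions, got {len(tile_indices)}"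
--
--     return tile_indices
-- ===== SOURCE B (Python) =====
-- def get_tile_center(pos, canvas_size=6, kernel_size=3):
--     """Calculate the window center for a given position with edge clamping"""
--     kernel_half = kernel_size // 2
--     row = pos // canvas_size
--     col = pos % canvas_size
--
--     # Clamp the center coordinates
--     center_row = min(max(row, kernel_half), canvas_size - kernel_half - 1)
--     center_col = min(max(col, kernel_half), canvas_size - kernel_half - 1)
--
--     return center_row, center_col
--
-- def get_tile_window_indices(query_tile, canvas_size=12, window_size=3):
--     """Get indices of tiles within the window for a given query tile"""
--     tiles_per_row = canvas_size // 2
--     center_row, center_col = get_tile_center(query_tile, tiles_per_row)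
--     half_window = window_size // 2
--
--     # The window's positions form span rows of span*4 consecutive position
--     # indices each; decode the k-th emitted position arithmetically from the
--     # window's top-left position `base` instead of nesting loops.
--     span = 2 * half_window + 1
--     per_row = span * 4
--     base = ((center_row - half_window) * tiles_per_row + (center_col - half_window)) * 4
--     row_stride = tiles_per_row * 4
--     tile_indices = [base + (k // per_row) * row_stride + k % per_row
--                     for k in range(span * per_row)]
--     assert len(tile_indices) == 36, f"Expected 9 positions, got {len(tile_indices)}"
--
--     return tile_indices
-- ===== Notes on version B (the rewrite author's own statement) =====
-- stated objective: alternative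
-- what changed: A's three nested loops (rows x cols x 4 positions) are replaced by a single flat comprehension over all span*span*4 output slots, decoding each slot index k arithmetically (divmod by the per-row run length) from the window's top-left position.
import Mathlib
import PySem

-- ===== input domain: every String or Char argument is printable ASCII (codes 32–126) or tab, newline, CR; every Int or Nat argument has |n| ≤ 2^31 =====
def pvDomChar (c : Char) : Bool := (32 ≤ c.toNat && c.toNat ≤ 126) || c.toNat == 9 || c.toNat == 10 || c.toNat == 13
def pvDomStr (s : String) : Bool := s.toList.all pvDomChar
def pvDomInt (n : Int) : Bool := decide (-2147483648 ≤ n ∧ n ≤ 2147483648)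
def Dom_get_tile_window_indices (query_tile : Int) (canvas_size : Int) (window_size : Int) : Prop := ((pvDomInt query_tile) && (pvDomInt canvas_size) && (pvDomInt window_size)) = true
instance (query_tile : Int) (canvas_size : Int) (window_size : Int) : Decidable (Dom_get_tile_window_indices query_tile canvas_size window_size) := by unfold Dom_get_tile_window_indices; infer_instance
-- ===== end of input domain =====

-- B replaces A's three nested loops by one flat comprehension over all output
-- slots, decoding each slot index arithmetically (divmod) from the window's
-- top-left position; alternative decomposition, same values in the same order.

-- ===== PORT A =====
-- shared same-module helper, identical in both Python files
def get_tile_center (pos : Int) (canvas_size : Int) (kernel_size : Int) : Int × Int :=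
  let kernel_half := PySem.Int.floordiv kernel_size 2
  let row := PySem.Int.floordiv pos canvas_size
  let col := PySem.Int.mod pos canvas_size
  let center_row := min (max row kernel_half) (canvas_size - kernel_half - 1)
  let center_col := min (max col kernel_half) (canvas_size - kernel_half - 1)
  (center_row, center_col)

def get_tile_window_indices (query_tile : Int) (canvas_size : Int) (window_size : Int) : List Int :=
  let tiles_per_row := PySem.Int.floordiv canvas_size 2
  let c := get_tile_center query_tile tiles_per_row 3
  let half_window := PySem.Int.floordiv window_size 2
  let start_row := c.1 - half_window
  let end_row := c.1 + half_window + 1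
  let start_col := c.2 - half_window
  let end_col := c.2 + half_window + 1
  (PySem.List.pyRange start_row end_row 1).foldl (fun acc row =>
    (PySem.List.pyRange start_col end_col 1).foldl (fun acc col =>
      let tile_idx := row * tiles_per_row + col
      (PySem.List.pyRange 0 4 1).foldl (fun acc i =>
        acc ++ [tile_idx * 4 + i]) acc) acc) []
  -- assert len == 36: raises outside Pre_, excluded there

-- ===== PORT B =====
def get_tile_window_indices_alt (query_tile : Int) (canvas_size : Int) (window_size : Int) : List Int :=
  let tiles_per_row := PySem.Int.floordiv canvas_size 2
  let c := get_tile_center query_tile tiles_per_row 3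
  let half_window := PySem.Int.floordiv window_size 2
  let span := 2 * half_window + 1
  let per_row := span * 4
  let base := ((c.1 - half_window) * tiles_per_row + (c.2 - half_window)) * 4
  let row_stride := tiles_per_row * 4
  (PySem.List.pyRange 0 (span * per_row) 1).map (fun k =>
    base + (PySem.Int.floordiv k per_row) * row_stride + PySem.Int.mod k per_row)
  -- assert len == 36: raises outside Pre_, excluded there

-- ===== PRECONDITION & SPEC =====
-- Pre_ excludes exactly where Python A raises: canvas_size ∈ {0,1} gives tiles_per_row = 0
-- (ZeroDivisionError), and window_size ∉ {2,3} makes the length ≠ 36 (AssertionError).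
def Pre_get_tile_window_indices (query_tile : Int) (canvas_size : Int) (window_size : Int) : Prop :=
  (canvas_size ≠ 0 ∧ canvas_size ≠ 1) ∧ (window_size = 2 ∨ window_size = 3)
instance (query_tile : Int) (canvas_size : Int) (window_size : Int) : Decidable (Pre_get_tile_window_indices query_tile canvas_size window_size) := by unfold Pre_get_tile_window_indices; infer_instance

def pvWitness_get_tile_window_indices : Int × Int × Int := (5, 12, 3)

def Spec_get_tile_window_indices (query_tile : Int) (canvas_size : Int) (window_size : Int) (out : List Int) : Prop := out = get_tile_window_indices_alt query_tile canvas_size window_size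
instance (query_tile : Int) (canvas_size : Int) (window_size : Int) (out : List Int) : Decidable (Spec_get_tile_window_indices query_tile canvas_size window_size out) := by unfold Spec_get_tile_window_indices; infer_instance

-- ===== CLAIM (what is proved, stated in full; the proofs are below) =====
def Claim_equal_get_tile_window_indices : Prop := ∀ (query_tile : Int) (canvas_size : Int) (window_size : Int), Dom_get_tile_window_indices query_tile canvas_size window_size → Pre_get_tile_window_indices query_tile canvas_size window_size → Spec_get_tile_window_indices query_tile canvas_size window_size (get_tile_window_indices query_tile canvas_size window_size)

-- ===== LEMMAS AND PROOFS =====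

lemma pyRange3 (a : Int) : PySem.List.pyRange (a - 1) (a + 2) 1 = [a - 1, a, a + 1] := by
  rw [PySem.List.pyRange_one]
  have h : (a + 2 - (a - 1)).toNat = 3 := by omega
  simp [List.range_succ]
  omega

lemma half2 : PySem.Int.floordiv 2 2 = 1 := by decide
lemma half3 : PySem.Int.floordiv 3 2 = 1 := by decide

-- ===== VERDICT (by name: the statement is the Claim_ definition above) =====
theorem get_tile_window_indices_spec : Claim_equal_get_tile_window_indices := by
  intro q cs ws _ hpre
  obtain ⟨_, hw⟩ := hpre
  have hhw : PySem.Int.floordiv ws 2 = 1 := by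
    rcases hw with h | h <;> subst h
    · exact half2
    · exact half3
  unfold Spec_get_tile_window_indices get_tile_window_indices get_tile_window_indices_alt
  simp only [hhw]
  set tpr := PySem.Int.floordiv cs 2
  set c := get_tile_center q tpr 3
  have e2 : c.1 + 1 + 1 = c.1 + 2 := by ring
  have e2' : c.2 + 1 + 1 = c.2 + 2 := by ring
  rw [e2, e2', pyRange3, pyRange3]
  have h4 : PySem.List.pyRange 0 4 1 = [0, 1, 2, 3] := by decide
  have h36 : PySem.List.pyRange 0 ((2 * 1 + 1) * ((2 * 1 + 1) * 4)) 1
      = (List.range 36).map (fun n => (n : Int)) := by decide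
  simp only [h4, h36, List.foldl_cons, List.foldl_nil, List.nil_append, List.range_succ,
    List.range_zero]
  norm_num [PySem.Int.floordiv, PySem.Int.mod, Int.fdiv_eq_ediv_of_nonneg,
    Int.fmod_eq_emod_of_nonneg]
  constructor <;> [skip; constructor] <;> ring_nf <;> try trivial
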